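-- pv_equiv track=rewrite | github.com/eduardofsjunior/spirited-data | scripts/analyze_multi_language_validation.py | calculate_pass_rate_by_language
-- ===== SOURCE A (Python) =====
-- from typing import Dict, List, Any
--
-- def calculate_pass_rate_by_language(results: Dict) -> Dict[str, Dict[str, int]]:
--     """
--     Calculate pass rates broken down by language.
--
--     Returns:
--         Dict mapping language codes to counts: {lang: {pass: N, warn: N, fail: N}}
--     """
--     lang_stats = {}
--
--     for film_slug, film_data in results.items():
--         if film_slug.startswith("_") or film_slug == "film1":
--             continue
--
--         per_lang = film_data.get("per_language", {})
--
--         for lang_code, lang_data in per_lang.items():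
--             if lang_code not in lang_stats:
--                 lang_stats[lang_code] = {"pass": 0, "warn": 0, "fail": 0, "total": 0}
--
--             status = lang_data.get("status", "UNKNOWN").lower()
--
--             if status == "pass":
--                 lang_stats[lang_code]["pass"] += 1
--             elif status == "warn":
--                 lang_stats[lang_code]["warn"] += 1
--             elif status == "fail":
--                 lang_stats[lang_code]["fail"] += 1
--
--             lang_stats[lang_code]["total"] += 1
--
--     return lang_stats
-- ===== SOURCE B (Python) =====
-- def _unit(status):
--     """The stats contribution of a single per-language entry."""
--     row = {k: (1 if k == status else 0) for k in ("pass", "warn", "fail")}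
--     row["total"] = 1
--     return row
--
--
-- def _merge(a, b):
--     """Combine two language-stats dicts by adding rows; keys keep first-seen order."""
--     out = {lang: {k: v + b.get(lang, {}).get(k, 0) for k, v in row.items()}
--            for lang, row in a.items()}
--     for lang, row in b.items():
--         if lang not in out:
--             out[lang] = dict(row)
--     return out
--
--
-- def _combine(units):
--     """Divide-and-conquer reduction of the unit dicts under _merge."""
--     if not units:
--         return {}
--     if len(units) == 1:
--         return units[0]
--     mid = len(units) // 2
--     return _merge(_combine(units[:mid]), _combine(units[mid:]))
--
--
-- def calculate_pass_rate_by_language(results):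
--     """Map each (film, language) entry to a unit stats dict and reduce them
--     with an associative merge by divide and conquer."""
--     units = [
--         {lang: _unit(data.get("status", "UNKNOWN").lower())}
--         for slug, fd in results.items()
--         if not (slug.startswith("_") or slug == "film1")
--         for lang, data in fd.get("per_language", {}).items()
--     ]
--     return _combine(units)
-- ===== Notes on version B (the rewrite author's own statement) =====
-- stated objective: alternative
-- what changed: Replaces A's single pass that increments a nested per-language dict per entry with a map-reduce scheme: each (film, language) entry becomes a one-language unit stats dict, and the units are reduced by divide-and-conquer under an associative order-preserving merge that adds rows pointwise.
import Mathlib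
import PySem

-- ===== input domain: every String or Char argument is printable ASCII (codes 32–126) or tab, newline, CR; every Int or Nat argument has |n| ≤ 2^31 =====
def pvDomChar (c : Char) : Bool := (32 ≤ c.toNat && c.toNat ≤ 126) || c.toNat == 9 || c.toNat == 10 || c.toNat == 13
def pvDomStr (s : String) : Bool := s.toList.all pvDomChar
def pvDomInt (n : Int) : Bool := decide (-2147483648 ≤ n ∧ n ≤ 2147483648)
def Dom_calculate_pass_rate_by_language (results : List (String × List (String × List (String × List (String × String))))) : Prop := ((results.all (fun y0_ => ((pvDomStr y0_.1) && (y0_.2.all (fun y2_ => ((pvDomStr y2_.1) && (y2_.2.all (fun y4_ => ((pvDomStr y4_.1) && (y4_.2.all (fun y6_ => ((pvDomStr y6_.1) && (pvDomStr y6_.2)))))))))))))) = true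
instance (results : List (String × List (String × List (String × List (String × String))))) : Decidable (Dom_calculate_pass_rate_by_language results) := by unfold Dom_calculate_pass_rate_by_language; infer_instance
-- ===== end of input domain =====

-- B replaces A's single incremental pass over a nested dict by a map-reduce scheme:
-- each (film, language) entry becomes a one-language unit stats dict and the units
-- are reduced by divide-and-conquer under an associative merge (objective: alternative, not faster).

-- ===== PORT A =====
-- Literal port of A: fold over the films, skip "_"-prefixed slugs and "film1",
-- fold over per_language entries incrementing the nested dict in place.
def calculate_pass_rate_by_language (results : List (String × List (String × List (String × List (String × String))))) : List (String × List (String × Int)) :=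
  let lang_stats :=
    (PySem.Dict.ofList results).items.foldl
      (fun (st : PySem.Dict String (PySem.Dict String Int)) film =>
        if PySem.Str.startswith film.1 "_" || film.1 == "film1" then st
        else
          (PySem.Dict.ofList (PySem.Dict.getD (PySem.Dict.ofList film.2) "per_language" [])).items.foldl
            (fun st entry =>
              let st1 := if st.contains entry.1 then st
                else st.insert entry.1 (PySem.Dict.ofList [("pass", (0 : Int)), ("warn", 0), ("fail", 0), ("total", 0)])
              let status := PySem.Str.lower (PySem.Dict.getD (PySem.Dict.ofList entry.2) "status" "UNKNOWN")
              let st2 :=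
                if status == "pass" then st1.modify entry.1 PySem.Dict.empty (fun d => d.modify "pass" 0 (· + 1))
                else if status == "warn" then st1.modify entry.1 PySem.Dict.empty (fun d => d.modify "warn" 0 (· + 1))
                else if status == "fail" then st1.modify entry.1 PySem.Dict.empty (fun d => d.modify "fail" 0 (· + 1))
                else st1
              st2.modify entry.1 PySem.Dict.empty (fun d => d.modify "total" 0 (· + 1)))
            st)
      PySem.Dict.empty
  lang_stats.items.map (fun p => (p.1, p.2.items))

-- ===== PORT B =====
-- _unit(status): {k: 1 if k == status else 0 for k in ("pass","warn","fail")}; row["total"] = 1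
def pvUnit (status : String) : PySem.Dict String Int :=
  (PySem.Dict.ofList ((["pass", "warn", "fail"]).map (fun k => (k, if k = status then (1 : Int) else 0)))).insert "total" 1

-- the singleton dict {lang: _unit(...)} one comprehension element builds
def pvUnitOfEntry (entry : String × List (String × String)) : PySem.Dict String (PySem.Dict String Int) :=
  PySem.Dict.ofList [(entry.1, pvUnit (PySem.Str.lower (PySem.Dict.getD (PySem.Dict.ofList entry.2) "status" "UNKNOWN")))]

-- the unit dicts contributed by one film (none if the film is skipped)
def pvFilmUnits (film : String × List (String × List (String × List (String × String)))) : List (PySem.Dict String (PySem.Dict String Int)) :=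
  if PySem.Str.startswith film.1 "_" || film.1 == "film1" then []
  else (PySem.Dict.ofList (PySem.Dict.getD (PySem.Dict.ofList film.2) "per_language" [])).items.map pvUnitOfEntry

-- _merge(a, b): add rows pointwise over a's keys (b.get(lang,{}).get(k,0)), then append b's new keys
def pvMerge (a b : PySem.Dict String (PySem.Dict String Int)) : PySem.Dict String (PySem.Dict String Int) :=
  let out := PySem.Dict.ofList (a.items.map (fun p =>
    (p.1, PySem.Dict.ofList (p.2.items.map (fun kv =>
      (kv.1, kv.2 + (b.getD p.1 PySem.Dict.empty).getD kv.1 0))))))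
  -- Python's 'out[lang] = dict(row)' copies the row; values are immutable here, so the copy is the row itself
  b.items.foldl (fun out p => if out.contains p.1 then out else out.insert p.1 p.2) out

-- _combine(units): divide-and-conquer reduction; units[:mid]/units[mid:] with 0 ≤ mid ≤ len are take/drop
def pvCombine (units : List (PySem.Dict String (PySem.Dict String Int))) : PySem.Dict String (PySem.Dict String Int) :=
  match units with
  | [] => PySem.Dict.empty
  | [u] => u
  | u1 :: u2 :: rest =>
    let all := u1 :: u2 :: rest
    let mid := all.length / 2
    pvMerge (pvCombine (all.take mid)) (pvCombine (all.drop mid))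
termination_by units.length
decreasing_by
  · simp only [List.length_take]; simp only [List.length_cons]; omega
  · simp only [List.length_drop]; simp only [List.length_cons]; omega

def calculate_pass_rate_by_language_alt (results : List (String × List (String × List (String × List (String × String))))) : List (String × List (String × Int)) :=
  let units := (PySem.Dict.ofList results).items.flatMap pvFilmUnits
  (pvCombine units).items.map (fun p => (p.1, p.2.items))

-- ===== PRECONDITION & SPEC =====
def Spec_calculate_pass_rate_by_language (results : List (String × List (String × List (String × List (String × String))))) (out : List (String × List (String × Int))) : Prop := out = calculate_pass_rate_by_language_alt results
instance (results : List (String × List (String × List (String × List (String × String))))) (out : List (String × List (String × Int))) : Decidable (Spec_calculate_pass_rate_by_language results out) := by unfold Spec_calculate_pass_rate_by_language; infer_instance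

-- ===== CLAIM (what is proved, stated in full; the proofs are below) =====
def Claim_equal_calculate_pass_rate_by_language : Prop := ∀ (results : List (String × List (String × List (String × List (String × String))))), Dom_calculate_pass_rate_by_language results → Spec_calculate_pass_rate_by_language results (calculate_pass_rate_by_language results)

-- ===== LEMMAS AND PROOFS =====

-- one flattened event, (lang_code, status.lower())
def pvStatusOf (entry : String × List (String × String)) : String × String :=
  (entry.1, PySem.Str.lower (PySem.Dict.getD (PySem.Dict.ofList entry.2) "status" "UNKNOWN"))

-- the events contributed by one film (none if the film is skipped)
def pvFilmEvents (film : String × List (String × List (String × List (String × String)))) : List (String × String) :=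
  if PySem.Str.startswith film.1 "_" || film.1 == "film1" then []
  else (PySem.Dict.ofList (PySem.Dict.getD (PySem.Dict.ofList film.2) "per_language" [])).items.map pvStatusOf

-- the row for language L determined by the flat event list
def pvRow (L : String) (evs : List (String × String)) : List (String × Int) :=
  [("pass", (evs.count (L, "pass") : Int)),
   ("warn", (evs.count (L, "warn") : Int)),
   ("fail", (evs.count (L, "fail") : Int)),
   ("total", ((evs.countP (fun e => e.1 == L)) : Int))]

-- the nested dict both programs have built once the events evs have been processed
def pvShape (evs : List (String × String)) : PySem.Dict String (PySem.Dict String Int) :=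
  PySem.Dict.mk ((PySem.List.dedup (evs.map Prod.fst)).map (fun L => (L, PySem.Dict.mk (pvRow L evs))))

-- A's inner loop body as a function of the event (lang_code, lowered status)
def pvStepA (st : PySem.Dict String (PySem.Dict String Int)) (ev : String × String) : PySem.Dict String (PySem.Dict String Int) :=
  let st1 := if st.contains ev.1 then st
    else st.insert ev.1 (PySem.Dict.ofList [("pass", (0 : Int)), ("warn", 0), ("fail", 0), ("total", 0)])
  let st2 :=
    if ev.2 == "pass" then st1.modify ev.1 PySem.Dict.empty (fun d => d.modify "pass" 0 (· + 1))
    else if ev.2 == "warn" then st1.modify ev.1 PySem.Dict.empty (fun d => d.modify "warn" 0 (· + 1))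
    else if ev.2 == "fail" then st1.modify ev.1 PySem.Dict.empty (fun d => d.modify "fail" 0 (· + 1))
    else st1
  st2.modify ev.1 PySem.Dict.empty (fun d => d.modify "total" 0 (· + 1))

lemma pvRow_append_other (pre : List (String × String)) (L s k : String) (hk : k ≠ L) :
    pvRow k (pre ++ [(L, s)]) = pvRow k pre := by
  simp [pvRow, List.count_append, List.countP_append, Ne.symm hk]

lemma pvRow_append_self (pre : List (String × String)) (L s : String) :
    pvRow L (pre ++ [(L, s)]) =
      [("pass", (pre.count (L, "pass") : Int) + if s = "pass" then 1 else 0),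
       ("warn", (pre.count (L, "warn") : Int) + if s = "warn" then 1 else 0),
       ("fail", (pre.count (L, "fail") : Int) + if s = "fail" then 1 else 0),
       ("total", (pre.countP (fun e => e.1 == L) : Int) + 1)] := by
  have hp : ∀ x : String, (pre ++ [(L, s)]).count (L, x) = pre.count (L, x) + if s = x then 1 else 0 := by
    intro x; by_cases h : s = x <;> simp [List.count_append, h, Prod.ext_iff]
  simp only [pvRow, hp, List.countP_append]
  norm_num [apply_ite]

lemma pvRow_of_not_mem (pre : List (String × String)) (L : String) (hmem : L ∉ pre.map Prod.fst) :
    pvRow L pre = [("pass", 0), ("warn", 0), ("fail", 0), ("total", 0)] := by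
  have h1 : ∀ x, pre.count (L, x) = 0 := fun x =>
    List.count_eq_zero.mpr (fun h => hmem (List.mem_map_of_mem h))
  have h2 : pre.countP (fun e => e.1 == L) = 0 :=
    List.countP_eq_zero.mpr (fun e he hbeq => hmem (by
      have : e.1 = L := by simpa using hbeq
      exact this ▸ List.mem_map_of_mem he))
  simp [pvRow, h1, h2]

lemma pvShape_keys (evs : List (String × String)) :
    (pvShape evs).keys = PySem.List.dedup (evs.map Prod.fst) := by
  simp only [pvShape, PySem.Dict.keys_mk, List.map_map, PySem.List.dedup_eq_ofList]
  exact List.map_id' _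

lemma pvShape_contains (evs : List (String × String)) (L : String) :
    (pvShape evs).contains L = decide (L ∈ evs.map Prod.fst) := by
  rw [PySem.Dict.contains_eq_decide_mem_keys, pvShape_keys]
  simp [PySem.List.dedup_eq_ofList, PySem.Set.mem_ofList]

lemma pvShape_insert (pre : List (String × String)) (L s : String) :
    (pvShape pre).insert L (PySem.Dict.mk (pvRow L (pre ++ [(L, s)]))) = pvShape (pre ++ [(L, s)]) := by
  apply PySem.Dict.ext
  by_cases hmem : L ∈ pre.map Prod.fst
  · rw [PySem.Dict.items_insert_of_contains _ _ (by rw [pvShape_contains]; simp only [decide_eq_true_eq]; exact hmem)]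
    show List.map _ (List.map _ _) = _
    rw [List.map_map]
    show _ = (PySem.List.dedup ((pre ++ [(L, s)]).map Prod.fst)).map _
    have hK : PySem.List.dedup ((pre ++ [(L, s)]).map Prod.fst) = PySem.List.dedup (pre.map Prod.fst) := by
      simp [PySem.List.dedup_eq_ofList, PySem.Set.ofList_append, PySem.Set.update_cons,
        PySem.Set.update_nil, PySem.Set.add, PySem.Set.contains_eq_listContains,
        List.contains_eq_mem, PySem.Set.mem_ofList, hmem]
    rw [hK]
    refine List.map_congr_left (fun k hkK => ?_)
    by_cases hk : k = L
    · subst hk; simp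
    · simp [Function.comp, hk, pvRow_append_other pre L s k hk]
  · rw [PySem.Dict.items_insert_of_not_contains _ _ (by rw [pvShape_contains]; simp only [decide_eq_false_iff_not]; exact hmem)]
    show _ = (PySem.List.dedup ((pre ++ [(L, s)]).map Prod.fst)).map _
    have hK : PySem.List.dedup ((pre ++ [(L, s)]).map Prod.fst) = PySem.List.dedup (pre.map Prod.fst) ++ [L] := by
      simp [PySem.List.dedup_eq_ofList, PySem.Set.ofList_append, PySem.Set.update_cons,
        PySem.Set.update_nil, PySem.Set.add, PySem.Set.contains_eq_listContains,
        List.contains_eq_mem, PySem.Set.mem_ofList, hmem]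
    rw [hK, List.map_append]
    show List.map _ _ ++ _ = _
    congr 1
    refine List.map_congr_left (fun k hkK => ?_)
    have hk : k ≠ L := by
      rintro rfl
      exact hmem (by simpa [PySem.List.dedup_eq_ofList, PySem.Set.mem_ofList] using hkK)
    rw [pvRow_append_other pre L s k hk]

-- the conditional "initialise the language's row" step, as one insert
lemma pvSt1_eq (pre : List (String × String)) (L : String) :
    (if (pvShape pre).contains L then pvShape pre
     else (pvShape pre).insert L (PySem.Dict.ofList [("pass", (0 : Int)), ("warn", 0), ("fail", 0), ("total", 0)]))
    = (pvShape pre).insert L (PySem.Dict.mk (pvRow L pre)) := by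
  by_cases hmem : L ∈ pre.map Prod.fst
  · have hc : (pvShape pre).contains L = true := by
      rw [pvShape_contains]; simp only [decide_eq_true_eq]; exact hmem
    rw [if_pos hc]
    apply PySem.Dict.ext
    rw [PySem.Dict.items_insert_of_contains _ _ hc]
    show _ = List.map _ (List.map _ _)
    rw [List.map_map]
    refine (List.map_congr_left (fun k hkK => ?_)).symm
    by_cases hk : k = L
    · subst hk; simp
    · simp [Function.comp, hk]
  · have hc : (pvShape pre).contains L = false := by
      rw [pvShape_contains]; simp only [decide_eq_false_iff_not]; exact hmem
    rw [if_neg (by simp [hc]), pvRow_of_not_mem pre L hmem]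
    rfl

lemma pvCollapse (st : PySem.Dict String (PySem.Dict String Int)) (L : String)
    (v : PySem.Dict String Int) (g : PySem.Dict String Int → PySem.Dict String Int) :
    (st.insert L v).modify L PySem.Dict.empty g = st.insert L (g v) := by
  simp only [PySem.Dict.modify, PySem.Dict.getD_insert_self, PySem.Dict.insert_insert_self]

lemma pvStepA_shape (pre : List (String × String)) (L s : String) :
    pvStepA (pvShape pre) (L, s) = pvShape (pre ++ [(L, s)]) := by
  rw [← pvShape_insert pre L s, pvRow_append_self]
  simp only [pvStepA]
  rw [pvSt1_eq pre L]
  by_cases h1 : s = "pass"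
  · subst h1
    simp only [String.reduceBEq, String.reduceEq, Bool.false_eq_true, if_false, ite_true]
    rw [pvCollapse, pvCollapse]
    refine congrArg ((pvShape pre).insert L) ?_
    simp [pvRow, PySem.Dict.modify, PySem.Dict.insert, PySem.Dict.contains,
      PySem.Dict.getD, PySem.Dict.get?, List.find?, List.any]
  · by_cases h2 : s = "warn"
    · subst h2
      simp only [String.reduceBEq, String.reduceEq, Bool.false_eq_true, if_false, ite_true]
      rw [pvCollapse, pvCollapse]
      refine congrArg ((pvShape pre).insert L) ?_
      simp [pvRow, PySem.Dict.modify, PySem.Dict.insert, PySem.Dict.contains,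
        PySem.Dict.getD, PySem.Dict.get?, List.find?, List.any]
    · by_cases h3 : s = "fail"
      · subst h3
        simp only [String.reduceBEq, String.reduceEq, Bool.false_eq_true, if_false, ite_true]
        rw [pvCollapse, pvCollapse]
        refine congrArg ((pvShape pre).insert L) ?_
        simp [pvRow, PySem.Dict.modify, PySem.Dict.insert, PySem.Dict.contains,
          PySem.Dict.getD, PySem.Dict.get?, List.find?, List.any]
      · simp only [beq_iff_eq, if_neg h1, if_neg h2, if_neg h3]
        rw [pvCollapse]
        refine congrArg ((pvShape pre).insert L) ?_
        simp [pvRow, PySem.Dict.modify, PySem.Dict.insert, PySem.Dict.contains,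
          PySem.Dict.getD, PySem.Dict.get?, List.find?, List.any]

lemma pvFold_shape (evs pre : List (String × String)) :
    evs.foldl pvStepA (pvShape pre) = pvShape (pre ++ evs) := by
  induction evs generalizing pre with
  | nil => simp
  | cons e rest ih =>
    obtain ⟨L, s⟩ := e
    rw [List.foldl_cons, pvStepA_shape pre L s, ih (pre ++ [(L, s)]), List.append_assoc]
    rfl

-- A's nested loop is the event fold
lemma pvFilm_foldl (films : List (String × List (String × List (String × List (String × String)))))
    (st : PySem.Dict String (PySem.Dict String Int)) :
    films.foldl
      (fun st film =>
        if PySem.Str.startswith film.1 "_" || film.1 == "film1" then st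
        else
          (PySem.Dict.ofList (PySem.Dict.getD (PySem.Dict.ofList film.2) "per_language" [])).items.foldl
            (fun st entry =>
              let st1 := if st.contains entry.1 then st
                else st.insert entry.1 (PySem.Dict.ofList [("pass", (0 : Int)), ("warn", 0), ("fail", 0), ("total", 0)])
              let status := PySem.Str.lower (PySem.Dict.getD (PySem.Dict.ofList entry.2) "status" "UNKNOWN")
              let st2 :=
                if status == "pass" then st1.modify entry.1 PySem.Dict.empty (fun d => d.modify "pass" 0 (· + 1))
                else if status == "warn" then st1.modify entry.1 PySem.Dict.empty (fun d => d.modify "warn" 0 (· + 1))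
                else if status == "fail" then st1.modify entry.1 PySem.Dict.empty (fun d => d.modify "fail" 0 (· + 1))
                else st1
              st2.modify entry.1 PySem.Dict.empty (fun d => d.modify "total" 0 (· + 1)))
            st)
      st
    = (films.flatMap pvFilmEvents).foldl pvStepA st := by
  induction films generalizing st with
  | nil => rfl
  | cons f rest ih =>
    rw [List.foldl_cons, List.flatMap_cons, List.foldl_append, ih]
    congr 1
    by_cases hf : (PySem.Str.startswith f.1 "_" || f.1 == "film1") = true
    · rw [if_pos hf]
      simp only [pvFilmEvents]
      rw [if_pos hf]
      rfl
    · rw [if_neg hf]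
      simp only [pvFilmEvents]
      rw [if_neg hf, List.foldl_map]
      rfl

-- ============ B-side lemmas ============

-- the unit dict of one event
def pvUnitD (ev : String × String) : PySem.Dict String (PySem.Dict String Int) :=
  PySem.Dict.ofList [(ev.1, pvUnit ev.2)]

lemma pvFilmUnits_eq (film : String × List (String × List (String × List (String × String)))) :
    pvFilmUnits film = (pvFilmEvents film).map pvUnitD := by
  simp only [pvFilmUnits, pvFilmEvents]
  by_cases hf : (PySem.Str.startswith film.1 "_" || film.1 == "film1") = true
  · rw [if_pos hf, if_pos hf]; rfl
  · rw [if_neg hf, if_neg hf, List.map_map]; rfl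

lemma pvUnit_eq_row (L s : String) : pvUnit s = PySem.Dict.mk (pvRow L [(L, s)]) := by
  have h : ∀ x : String, (([(L, s)] : List (String × String)).count (L, x) : Int) = if x = s then 1 else 0 := by
    intro x
    by_cases h : s = x <;> simp [Prod.ext_iff, h] <;> simp [Ne.symm h]
  apply PySem.Dict.ext
  simp [pvUnit, pvRow, h, PySem.Dict.insert, PySem.Dict.ofList, PySem.Dict.update,
    PySem.Dict.contains, PySem.Dict.empty]

lemma pvUnitD_shape (L s : String) : pvUnitD (L, s) = pvShape [(L, s)] := by
  show PySem.Dict.ofList [(L, pvUnit s)] = _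
  rw [pvUnit_eq_row L s]
  rfl

-- a dict built from a list with distinct keys is that list verbatim
lemma pvOfList_eq_mk {ν : Type} (l : List (String × ν)) (h : (l.map Prod.fst).Nodup) :
    PySem.Dict.ofList l = PySem.Dict.mk l := by
  apply PySem.Dict.ext
  have := PySem.Dict.items_foldl_insert_fresh (l := l) (k := Prod.fst) (v := Prod.snd)
    (d := PySem.Dict.empty) (by intro a _; rfl) h
  simpa [PySem.Dict.ofList] using this

lemma pvShape_nodup_keys (evs : List (String × String)) : (pvShape evs).keys.Nodup := by
  rw [pvShape_keys]; exact PySem.List.nodup_dedup _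

lemma pvShape_getD (evs : List (String × String)) (L : String) :
    (pvShape evs).getD L PySem.Dict.empty =
      if L ∈ evs.map Prod.fst then PySem.Dict.mk (pvRow L evs) else PySem.Dict.empty := by
  by_cases h : L ∈ evs.map Prod.fst
  · rw [if_pos h]
    have hmem : (L, PySem.Dict.mk (pvRow L evs)) ∈ (pvShape evs).items :=
      List.mem_map_of_mem (by simpa [PySem.List.dedup_eq_ofList, PySem.Set.mem_ofList] using h)
    exact PySem.Dict.getD_of_mem_items _ hmem (pvShape_nodup_keys evs) _
  · rw [if_neg h]
    apply PySem.Dict.getD_of_not_contains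
    rw [pvShape_contains]; simpa using h

-- counts over events of other languages vanish
lemma pvRow_append_left_zero (e1 e2 : List (String × String)) (L : String)
    (h : L ∉ e1.map Prod.fst) : pvRow L (e1 ++ e2) = pvRow L e2 := by
  have h1 : ∀ x, e1.count (L, x) = 0 := fun x =>
    List.count_eq_zero.mpr (fun hm => h (List.mem_map_of_mem hm))
  have h2 : e1.countP (fun e => e.1 == L) = 0 :=
    List.countP_eq_zero.mpr (fun e he hbeq => h (by
      have : e.1 = L := by simpa using hbeq
      exact this ▸ List.mem_map_of_mem he))
  simp [pvRow, List.count_append, List.countP_append, h1, h2]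

-- pointwise row addition over a's row equals the row of the concatenation
lemma pvMergeRow_eq (e1 e2 : List (String × String)) (L : String) :
    (pvRow L e1).map (fun kv => (kv.1, kv.2 + ((pvShape e2).getD L PySem.Dict.empty).getD kv.1 0))
      = pvRow L (e1 ++ e2) := by
  rw [pvShape_getD]
  by_cases h : L ∈ e2.map Prod.fst
  · rw [if_pos h]
    simp [pvRow, PySem.Dict.getD, PySem.Dict.get?, List.count_append, List.countP_append]
  · rw [if_neg h]
    have h1 : ∀ x, e2.count (L, x) = 0 := fun x =>
      List.count_eq_zero.mpr (fun hm => h (List.mem_map_of_mem hm))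
    have h2 : e2.countP (fun e => e.1 == L) = 0 :=
      List.countP_eq_zero.mpr (fun e he hbeq => h (by
        have : e.1 = L := by simpa using hbeq
        exact this ▸ List.mem_map_of_mem he))
    simp [pvRow, PySem.Dict.getD_empty, List.count_append, List.countP_append, h1, h2]

-- the "append b's missing keys" loop, characterised
lemma pvFoldMissing (l : List (String × PySem.Dict String Int)) (d : PySem.Dict String (PySem.Dict String Int))
    (hl : (l.map Prod.fst).Nodup) (hd : d.keys.Nodup) :
    l.foldl (fun out p => if out.contains p.1 then out else out.insert p.1 p.2) d
      = PySem.Dict.mk (d.items ++ l.filter (fun p => !(d.contains p.1))) := by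
  induction l generalizing d with
  | nil => simpa using (PySem.Dict.ext rfl : d = PySem.Dict.mk d.items)
  | cons p l ih =>
    have hl' : (l.map Prod.fst).Nodup := (by simpa using hl : (p.1 ∉ l.map Prod.fst ∧ (l.map Prod.fst).Nodup)).2
    have hp : p.1 ∉ l.map Prod.fst := (by simpa using hl : (p.1 ∉ l.map Prod.fst ∧ (l.map Prod.fst).Nodup)).1
    rw [List.foldl_cons]
    by_cases hc : d.contains p.1 = true
    · rw [if_pos hc, ih d hl' hd]
      have hfil : List.filter (fun q => !(d.contains q.1)) (p :: l) = List.filter (fun q => !(d.contains q.1)) l := by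
        simp [List.filter_cons, hc]
      rw [hfil]
    · rw [if_neg hc]
      have hcf : d.contains p.1 = false := by simpa using hc
      rw [ih (d.insert p.1 p.2) hl' (PySem.Dict.nodup_keys_insert _ _ _ hd)]
      rw [PySem.Dict.items_insert_of_not_contains _ _ hcf]
      have hfil : l.filter (fun q => !((d.insert p.1 p.2).contains q.1))
          = l.filter (fun q => !(d.contains q.1)) := by
        refine List.filter_congr (fun q hq => ?_)
        have hne : (q.1 == p.1) = false := by
          have : q.1 ≠ p.1 := fun hEq => hp (hEq ▸ List.mem_map_of_mem hq)
          simpa using this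
        rw [PySem.Dict.contains_insert, hne, Bool.false_or]
      have hfil2 : List.filter (fun q => !(d.contains q.1)) (p :: l)
          = p :: List.filter (fun q => !(d.contains q.1)) l := by
        simp [List.filter_cons, hcf]
      rw [hfil, hfil2, List.append_assoc]
      rfl

-- foldl add from any start appends exactly the new first occurrences
lemma pvSetUpdate_split (ys : List String) (s : List String) :
    ys.foldl PySem.Set.add s
      = s ++ (ys.foldl PySem.Set.add []).filter (fun y => !(PySem.Set.contains s y)) := by
  induction ys generalizing s with
  | nil => simp
  | cons y ys ih =>
    rw [List.foldl_cons, List.foldl_cons, ih (PySem.Set.add s y)]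
    have hadd0 : PySem.Set.add ([] : List String) y = [y] := rfl
    rw [hadd0, ih [y]]
    have hmem : ∀ (t : List String) (x : String), PySem.Set.contains t x = decide (x ∈ t) := by
      intro t x
      simp [PySem.Set.contains_eq_listContains, List.contains_eq_mem]
    by_cases hy : PySem.Set.contains s y = true
    · have hyy : y ∈ s := by simpa [hmem] using hy
      have hadd : PySem.Set.add s y = s := by simp only [PySem.Set.add, hy, if_true]
      rw [hadd]
      simp only [List.filter_append, List.append_assoc]
      have h0 : ([y].filter (fun x => !(PySem.Set.contains s x))) = [] := by
        simp [List.filter_cons, hmem, hyy]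
      rw [h0, List.nil_append, List.filter_filter]
      refine congrArg (s ++ ·) (List.filter_congr (fun x hx => ?_))
      by_cases hxy : x = y
      · subst hxy
        simp [hmem, hyy]
      · simp [hmem, List.contains_eq_mem, hxy]
    · have hyy : y ∉ s := by simpa [hmem] using hy
      have hadd : PySem.Set.add s y = s ++ [y] := by
        simp only [PySem.Set.add, hy, Bool.false_eq_true, if_false]
      rw [hadd]
      simp only [List.filter_append, List.append_assoc]
      have h1 : ([y].filter (fun x => !(PySem.Set.contains s x))) = [y] := by
        simp [List.filter_cons, hmem, hyy]
      rw [h1, List.filter_filter]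
      refine congrArg (s ++ ·) (congrArg ([y] ++ ·) (List.filter_congr (fun x hx => ?_)))
      simp [hmem, List.contains_eq_mem, and_comm]

lemma pvDedup_append (K1 K2 : List String) :
    PySem.List.dedup (K1 ++ K2)
      = PySem.List.dedup K1 ++ (PySem.List.dedup K2).filter (fun y => !(decide (y ∈ K1))) := by
  have hof : ∀ K : List String, PySem.List.dedup K = K.foldl PySem.Set.add [] := by
    intro K; simp [PySem.List.dedup_eq_ofList, PySem.Set.ofList_eq_foldl]
  rw [hof, hof, hof, List.foldl_append, pvSetUpdate_split]
  refine congrArg _ (List.filter_congr (fun x hx => ?_))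
  have : PySem.Set.contains (K1.foldl PySem.Set.add []) x = decide (x ∈ K1) := by
    simp [PySem.Set.contains_eq_listContains, List.contains_eq_mem, ← PySem.Set.ofList_eq_foldl,
      PySem.Set.mem_ofList]
  rw [this]

lemma pvKeys_mkmap (K : List String) (g : String → PySem.Dict String Int) :
    (PySem.Dict.mk ((PySem.List.dedup K).map (fun L => (L, g L)))).keys = PySem.List.dedup K := by
  simp only [PySem.Dict.keys_mk, List.map_map]
  exact List.map_id' _

lemma pvContains_mkmap (K : List String) (g : String → PySem.Dict String Int) (x : String) :
    (PySem.Dict.mk ((PySem.List.dedup K).map (fun L => (L, g L)))).contains x = decide (x ∈ K) := by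
  rw [PySem.Dict.contains_eq_decide_mem_keys, pvKeys_mkmap]
  simp [PySem.List.dedup_eq_ofList, PySem.Set.mem_ofList]

lemma pvMerge_shape (e1 e2 : List (String × String)) :
    pvMerge (pvShape e1) (pvShape e2) = pvShape (e1 ++ e2) := by
  have step1 : (pvShape e1).items.map (fun p =>
      (p.1, PySem.Dict.ofList (p.2.items.map (fun kv =>
        (kv.1, kv.2 + ((pvShape e2).getD p.1 PySem.Dict.empty).getD kv.1 0)))))
      = (PySem.List.dedup (e1.map Prod.fst)).map (fun L => (L, PySem.Dict.mk (pvRow L (e1 ++ e2)))) := by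
    show ((PySem.List.dedup (e1.map Prod.fst)).map (fun L => (L, PySem.Dict.mk (pvRow L e1)))).map _ = _
    rw [List.map_map]
    refine List.map_congr_left (fun L _ => ?_)
    show (L, PySem.Dict.ofList ((pvRow L e1).map (fun kv =>
      (kv.1, kv.2 + ((pvShape e2).getD L PySem.Dict.empty).getD kv.1 0)))) = _
    rw [pvOfList_eq_mk _ (by simp [pvRow]), pvMergeRow_eq e1 e2 L]
  have hcont : ∀ x, (PySem.Dict.mk ((PySem.List.dedup (e1.map Prod.fst)).map
      (fun L => (L, PySem.Dict.mk (pvRow L (e1 ++ e2)))))).contains x = decide (x ∈ e1.map Prod.fst) :=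
    pvContains_mkmap _ _
  have hdk : (PySem.Dict.mk ((PySem.List.dedup (e1.map Prod.fst)).map
      (fun L => (L, PySem.Dict.mk (pvRow L (e1 ++ e2)))))).keys.Nodup := by
    rw [pvKeys_mkmap]
    exact PySem.List.nodup_dedup _
  show (pvShape e2).items.foldl (fun out p => if out.contains p.1 then out else out.insert p.1 p.2)
      (PySem.Dict.ofList ((pvShape e1).items.map _)) = _
  rw [step1, pvOfList_eq_mk _ (by
    simp only [List.map_map]
    have hid : ((PySem.List.dedup (e1.map Prod.fst)).map
        (Prod.fst ∘ fun L => (L, PySem.Dict.mk (pvRow L (e1 ++ e2))))) = PySem.List.dedup (e1.map Prod.fst) :=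
      List.map_id' _
    rw [hid]
    exact PySem.List.nodup_dedup _)]
  rw [pvFoldMissing _ _ (by simpa [PySem.Dict.keys] using pvShape_nodup_keys e2) hdk]
  have hfil : (pvShape e2).items.filter (fun p => !((PySem.Dict.mk ((PySem.List.dedup (e1.map Prod.fst)).map
        (fun L => (L, PySem.Dict.mk (pvRow L (e1 ++ e2)))))).contains p.1))
      = ((PySem.List.dedup (e2.map Prod.fst)).filter (fun y => !(decide (y ∈ e1.map Prod.fst)))).map
        (fun L => (L, PySem.Dict.mk (pvRow L (e1 ++ e2)))) := by
    show ((PySem.List.dedup (e2.map Prod.fst)).map (fun L => (L, PySem.Dict.mk (pvRow L e2)))).filter _ = _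
    rw [List.filter_map]
    have hp : ∀ y ∈ PySem.List.dedup (e2.map Prod.fst),
        ((fun p : String × PySem.Dict String Int => !((PySem.Dict.mk ((PySem.List.dedup (e1.map Prod.fst)).map
          (fun L => (L, PySem.Dict.mk (pvRow L (e1 ++ e2)))))).contains p.1)) ∘
            (fun L => (L, PySem.Dict.mk (pvRow L e2)))) y
        = (fun y => !(decide (y ∈ e1.map Prod.fst))) y := by
      intro y _
      show (!(PySem.Dict.mk ((PySem.List.dedup (e1.map Prod.fst)).map
        (fun L => (L, PySem.Dict.mk (pvRow L (e1 ++ e2)))))).contains y) = _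
      rw [hcont y]
    rw [List.filter_congr hp]
    refine List.map_congr_left (fun L hL => ?_)
    have hnot : L ∉ e1.map Prod.fst := by
      have := (List.mem_filter.mp hL).2
      simpa using this
    rw [pvRow_append_left_zero e1 e2 L hnot]
  rw [hfil]
  show PySem.Dict.mk ((PySem.List.dedup (e1.map Prod.fst)).map (fun L => (L, PySem.Dict.mk (pvRow L (e1 ++ e2)))) ++ _) = _
  have : pvShape (e1 ++ e2) = PySem.Dict.mk ((PySem.List.dedup (e1.map Prod.fst ++ e2.map Prod.fst)).map
      (fun L => (L, PySem.Dict.mk (pvRow L (e1 ++ e2))))) := by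
    simp [pvShape, List.map_append]
  rw [this, pvDedup_append, List.map_append]

lemma pvCombine_map_aux (n : Nat) : ∀ evs : List (String × String), evs.length ≤ n →
    pvCombine (evs.map pvUnitD) = pvShape evs := by
  induction n with
  | zero =>
    intro evs h
    have : evs = [] := List.eq_nil_of_length_eq_zero (Nat.le_zero.mp h)
    subst this
    rw [List.map_nil, pvCombine]
    rfl
  | succ n ih =>
    intro evs h
    match evs with
    | [] =>
      rw [List.map_nil, pvCombine]
      rfl
    | [e] =>
      obtain ⟨L, s⟩ := e
      show pvCombine [pvUnitD (L, s)] = _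
      rw [pvCombine]
      exact pvUnitD_shape L s
    | x1 :: x2 :: xs =>
      have hm : (x1 :: x2 :: xs).map pvUnitD = pvUnitD x1 :: pvUnitD x2 :: xs.map pvUnitD := rfl
      rw [hm, pvCombine]
      rw [← hm]
      have ht : ((x1 :: x2 :: xs).map pvUnitD).take (((x1 :: x2 :: xs).map pvUnitD).length / 2)
          = ((x1 :: x2 :: xs).take ((x1 :: x2 :: xs).length / 2)).map pvUnitD := by
        rw [List.length_map, List.map_take]
      have hd : ((x1 :: x2 :: xs).map pvUnitD).drop (((x1 :: x2 :: xs).map pvUnitD).length / 2)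
          = ((x1 :: x2 :: xs).drop ((x1 :: x2 :: xs).length / 2)).map pvUnitD := by
        rw [List.length_map, List.map_drop]
      rw [ht, hd]
      have hlen : (x1 :: x2 :: xs).length = xs.length + 2 := by simp
      have h1 : ((x1 :: x2 :: xs).take ((x1 :: x2 :: xs).length / 2)).length ≤ n := by
        rw [List.length_take]
        omega
      have h2 : ((x1 :: x2 :: xs).drop ((x1 :: x2 :: xs).length / 2)).length ≤ n := by
        rw [List.length_drop]
        omega
      rw [ih _ h1, ih _ h2, pvMerge_shape, List.take_append_drop]

lemma pvCombine_map (evs : List (String × String)) :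
    pvCombine (evs.map pvUnitD) = pvShape evs :=
  pvCombine_map_aux evs.length evs le_rfl

-- ===== VERDICT (by name: the statement is the Claim_ definition above) =====
theorem calculate_pass_rate_by_language_spec : Claim_equal_calculate_pass_rate_by_language := by
  intro results _
  show calculate_pass_rate_by_language results = calculate_pass_rate_by_language_alt results
  unfold calculate_pass_rate_by_language calculate_pass_rate_by_language_alt
  rw [pvFilm_foldl]
  rw [show (PySem.Dict.empty : PySem.Dict String (PySem.Dict String Int)) = pvShape [] from rfl,
    pvFold_shape]
  have hunits : (PySem.Dict.ofList results).items.flatMap pvFilmUnits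
      = ((PySem.Dict.ofList results).items.flatMap pvFilmEvents).map pvUnitD := by
    rw [List.map_flatMap]
    exact List.flatMap_congr (fun f _ => pvFilmUnits_eq f)
  rw [hunits]
  simp only [pvCombine_map, List.nil_append]
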